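-- pv_equiv track=rewrite | github.com/rishabh2001-py/DS-ALGO | Dynamic Programming/CountBinaryStrings.py | countBinary
-- ===== SOURCE A (Python) =====
-- def countBinary(n):
--
--     count0 = 1
--     count1 = 1
--
--     for i in range(2, n + 1):
--         temp = count0
--         count0 = count1 + count0
--         count1 = temp
--
--     return (count0 + count1) % (10 ** 9 + 7)
-- ===== SOURCE B (Python) =====
-- def countBinary(n):
--     MOD = 10 ** 9 + 7
--
--     def fib_pair(k):
--         # returns (F(k) % MOD, F(k+1) % MOD) by fast doubling
--         if k == 0:
--             return (0, 1)
--         a, b = fib_pair(k // 2)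
--         c = a * (2 * b - a) % MOD
--         d = (a * a + b * b) % MOD
--         if k % 2 == 1:
--             return (d, (c + d) % MOD)
--         return (c, d)
--
--     m = n if n > 1 else 1
--     return fib_pair(m + 2)[0]
-- ===== Notes on version B (the rewrite author's own statement) =====
-- stated objective: faster
-- what changed: Replaced the O(n) Fibonacci accumulation loop (on unbounded big integers) with O(log n) fast-doubling Fibonacci with modular arithmetic throughout, using the identity A(n) = Fib(n+2) mod 1e9+7 (clamped to n=1 for n<=1, where A's empty loop yields 2).
import Mathlib
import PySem

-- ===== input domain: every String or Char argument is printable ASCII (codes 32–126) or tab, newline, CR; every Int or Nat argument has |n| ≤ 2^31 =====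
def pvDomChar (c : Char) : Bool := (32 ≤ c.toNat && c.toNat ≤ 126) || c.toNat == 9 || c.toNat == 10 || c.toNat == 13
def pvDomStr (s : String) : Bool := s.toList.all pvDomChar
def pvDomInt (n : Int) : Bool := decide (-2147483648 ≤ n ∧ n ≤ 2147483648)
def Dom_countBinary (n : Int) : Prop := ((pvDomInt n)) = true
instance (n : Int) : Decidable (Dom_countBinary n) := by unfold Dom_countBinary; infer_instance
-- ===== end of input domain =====

-- B replaces A's O(n) Fibonacci loop by O(log n) fast doubling mod 10^9+7 (measured faster at large n).

-- ===== PORT A =====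
def countBinary (n : Int) : Int :=
  let st := (PySem.List.pyRange 2 (n + 1) 1).foldl
    (fun (s : Int × Int) _ => (s.2 + s.1, s.1)) (1, 1)
  PySem.Int.mod (st.1 + st.2) (10 ^ 9 + 7)

-- ===== PORT B =====
-- Source B's fib_pair is only ever called with a nonnegative argument (m + 2 ≥ 3),
-- so its recursion on k // 2 is ported as structural recursion on Nat (exact there).
def fibPairB : Nat → Int × Int
  | 0 => (0, 1)
  | (k + 1) =>
    let ab := fibPairB ((k + 1) / 2)
    let a := ab.1
    let b := ab.2
    let c := PySem.Int.mod (a * (2 * b - a)) 1000000007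
    let d := PySem.Int.mod (a * a + b * b) 1000000007
    if (k + 1) % 2 == 1 then (d, PySem.Int.mod (c + d) 1000000007) else (c, d)
decreasing_by exact Nat.div_lt_self (Nat.succ_pos k) one_lt_two

def countBinary_alt (n : Int) : Int :=
  let m : Int := if n > 1 then n else 1
  (fibPairB (m + 2).toNat).1

-- ===== PRECONDITION & SPEC =====
def Spec_countBinary (n : Int) (out : Int) : Prop := out = countBinary_alt n
instance (n : Int) (out : Int) : Decidable (Spec_countBinary n out) := by unfold Spec_countBinary; infer_instance

-- ===== CLAIM (what is proved, stated in full; the proofs are below) =====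
def Claim_equal_countBinary : Prop := ∀ (n : Int), Dom_countBinary n → Spec_countBinary n (countBinary n)

-- ===== LEMMAS AND PROOFS =====

-- fast-doubling correctness: fibPairB k = (fib k % P, fib (k+1) % P)
theorem fibPairB_eq (k : Nat) :
    fibPairB k = ((Nat.fib k : Int) % 1000000007, (Nat.fib (k + 1) : Int) % 1000000007) := by
  induction k using Nat.strong_induction_on with
  | _ k ih =>
    match k with
    | 0 => simp [fibPairB, Nat.fib]
    | (k + 1) =>
      have hlt : (k + 1) / 2 < k + 1 := Nat.div_lt_self (Nat.succ_pos k) one_lt_two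
      have hrec := ih ((k + 1) / 2) hlt
      set m := (k + 1) / 2 with hm
      have hP : (0 : Int) < 1000000007 := by norm_num
      have hmodP : ∀ x : Int, PySem.Int.mod x 1000000007 = x % 1000000007 := fun x =>
        PySem.Int.mod_eq_emod_of_pos hP
      -- cast fibonacci doubling identities to Int
      have hfib_le : Nat.fib m ≤ 2 * Nat.fib (m + 1) :=
        le_trans (Nat.fib_le_fib_succ) (by omega)
      have heven : (Nat.fib (2 * m) : Int) =
          (Nat.fib m : Int) * (2 * (Nat.fib (m + 1) : Int) - (Nat.fib m : Int)) := by
        have := Nat.fib_two_mul m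
        have h2 : ((Nat.fib m * (2 * Nat.fib (m + 1) - Nat.fib m) : Nat) : Int)
            = (Nat.fib m : Int) * (2 * (Nat.fib (m + 1) : Int) - (Nat.fib m : Int)) := by
          push_cast [Nat.cast_sub hfib_le]; ring
        rw [this, h2]
      have hodd : (Nat.fib (2 * m + 1) : Int) =
          (Nat.fib m : Int) * (Nat.fib m : Int) +
          (Nat.fib (m + 1) : Int) * (Nat.fib (m + 1) : Int) := by
        have := Nat.fib_two_mul_add_one m
        rw [this]; push_cast; ring
      -- modular congruences for c and d
      have hca : ((Nat.fib m : Int) % 1000000007) ≡ (Nat.fib m : Int) [ZMOD 1000000007] :=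
        Int.emod_emod_of_dvd _ dvd_rfl
      have hcb : ((Nat.fib (m + 1) : Int) % 1000000007) ≡ (Nat.fib (m + 1) : Int) [ZMOD 1000000007] :=
        Int.emod_emod_of_dvd _ dvd_rfl
      have hc : (((Nat.fib m : Int) % 1000000007) *
            (2 * ((Nat.fib (m + 1) : Int) % 1000000007) - (Nat.fib m : Int) % 1000000007))
            % 1000000007 = (Nat.fib (2 * m) : Int) % 1000000007 := by
        rw [heven]
        exact (hca.mul ((Int.ModEq.mul (Int.ModEq.refl 2) hcb).sub hca))
      have hd : (((Nat.fib m : Int) % 1000000007) * ((Nat.fib m : Int) % 1000000007) +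
            ((Nat.fib (m + 1) : Int) % 1000000007) * ((Nat.fib (m + 1) : Int) % 1000000007))
            % 1000000007 = (Nat.fib (2 * m + 1) : Int) % 1000000007 := by
        rw [hodd]
        exact ((hca.mul hca).add (hcb.mul hcb))
      have hcd : ((Nat.fib (2 * m) : Int) % 1000000007 + (Nat.fib (2 * m + 1) : Int) % 1000000007)
            % 1000000007 = (Nat.fib (2 * m + 2) : Int) % 1000000007 := by
        have : (Nat.fib (2 * m + 2) : Int) = (Nat.fib (2 * m) : Int) + (Nat.fib (2 * m + 1) : Int) := by
          rw [Nat.fib_add_two]; push_cast; ring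
        rw [this]
        have h1 : ((Nat.fib (2*m) : Int) % 1000000007) ≡ (Nat.fib (2*m) : Int) [ZMOD 1000000007] :=
          Int.emod_emod_of_dvd _ dvd_rfl
        have h2 : ((Nat.fib (2*m+1) : Int) % 1000000007) ≡ (Nat.fib (2*m+1) : Int) [ZMOD 1000000007] :=
          Int.emod_emod_of_dvd _ dvd_rfl
        exact h1.add h2
      rcases Nat.even_or_odd (k + 1) with he | ho
      · -- k + 1 = 2 * m
        have hk2 : k + 1 = 2 * m := by
          obtain ⟨t, ht⟩ := he; omega
        have hpar : (k + 1) % 2 = 0 := by omega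
        rw [fibPairB]
        simp only [← hm, hrec, hmodP, hpar]
        rw [hk2, if_neg (by decide)]
        rw [hc, hd]
      · -- k + 1 = 2 * m + 1
        have hk2 : k + 1 = 2 * m + 1 := by
          obtain ⟨t, ht⟩ := ho; omega
        have hpar : (k + 1) % 2 = 1 := by omega
        rw [fibPairB]
        simp only [← hm, hrec, hmodP, hpar]
        rw [hk2, if_pos (by decide)]
        simp only [Prod.mk.injEq]
        refine ⟨hd, ?_⟩
        rw [show 2 * m + 1 + 1 = 2 * m + 2 from rfl, ← hcd, hc, hd]

-- the loop invariant of A: after iterating i = 2 .. m, state = (fib (m+1), fib m)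
theorem loopA_eq (m : Nat) (h : 1 ≤ m) :
    (PySem.List.pyRange 2 ((m : Int) + 1) 1).foldl
      (fun (s : Int × Int) _ => (s.2 + s.1, s.1)) (1, 1)
    = ((Nat.fib (m + 1) : Int), (Nat.fib m : Int)) := by
  induction m with
  | zero => omega
  | succ m ih =>
    rcases Nat.lt_or_ge m 1 with hm | hm
    · interval_cases m
      norm_num [PySem.List.pyRange_one_singleton]
    · have hsplit : PySem.List.pyRange 2 ((m : Int) + 1 + 1) 1
          = PySem.List.pyRange 2 ((m : Int) + 1) 1 ++ [(m : Int) + 1] :=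
        PySem.List.pyRange_one_succ_right (by exact_mod_cast (by omega : (2:Int) ≤ (m:Int) + 1))
      have : ((m : Int) + 1) + 1 = (((m + 1 : Nat) : Int) + 1) := by push_cast; ring
      rw [← this] at *
      rw [hsplit, List.foldl_append, ih hm]
      simp [Nat.fib_add_two]

-- ===== VERDICT (by name: the statement is the Claim_ definition above) =====
theorem countBinary_spec : Claim_equal_countBinary := by
  intro n _
  unfold Spec_countBinary countBinary countBinary_alt
  have hP : (0 : Int) < 10 ^ 9 + 7 := by norm_num
  rcases le_or_gt n 1 with hn | hn
  · have hnil : PySem.List.pyRange 2 (n + 1) 1 = [] :=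
      PySem.List.pyRange_one_eq_nil (by omega)
    have hm : ¬ n > 1 := by omega
    simp [hnil, hm]
    norm_num [show ((1:Int)+2).toNat = 3 from rfl, fibPairB_eq 3, Nat.fib]
  · -- n ≥ 2
    have hmn : n = ((n.toNat : Int)) := by omega
    set m := n.toNat with hmdef
    have hm1 : 1 ≤ m := by omega
    have hrange : n + 1 = ((m : Int) + 1) := by omega
    rw [hrange, loopA_eq m hm1]
    have hif : (if n > 1 then n else 1) = n := by simp [hn]
    show PySem.Int.mod ((Nat.fib (m+1) : Int) + (Nat.fib m : Int)) (10 ^ 9 + 7)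
        = (fibPairB (((if n > 1 then n else 1) + 2)).toNat).1
    rw [hif]
    have htn : (n + 2).toNat = m + 2 := by omega
    rw [htn, fibPairB_eq (m + 2)]
    simp only [PySem.Int.mod_eq_emod_of_pos hP]
    have : (Nat.fib (m + 2) : Int) = (Nat.fib (m + 1) : Int) + (Nat.fib m : Int) := by
      rw [Nat.fib_add_two]; push_cast; ring
    norm_num [this]
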